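-- pv_equiv track=rewrite | github.com/s1200145/dataset_ai_for_code | pkg/generator/generator.py | get_dq_and_sq
-- ===== SOURCE A (Python) =====
-- def get_dq_and_sq(removed_comment):
--     dq_count = removed_comment.count('"')
--     dq_lists = []
--     start = 0
--     end = 0
--     i = 0
--     while True:
--         if(dq_count % 2 == 1):
--             break
--         if(dq_count / 2 != i):
--             start = removed_comment.find('"', end)
--             end = removed_comment.find('"', start+1)
--             e_string = removed_comment[start:end+1]
--             end += 1
--             dq_lists.append(e_string)
--         else:
--             break
--         i += 1
--
--     sq_count = removed_comment.count("'")
--     sq_lists = []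
--     start = 0
--     end = 0
--     i = 0
--
--     while True:
--         if(sq_count % 2 == 1):
--             break
--         if(sq_count / 2 != i):
--             start = removed_comment.find("'", end)
--             end = removed_comment.find("'", start+1)
--             e_string = removed_comment[start:end+1]
--             end += 1
--             sq_lists.append(e_string)
--         else:
--             break
--         i += 1
--
--     return dq_lists, sq_lists
-- ===== SOURCE B (Python) =====
-- def get_dq_and_sq(removed_comment):
--     def paired(q):
--         parts = removed_comment.split(q)
--         if len(parts) % 2 == 0:  # odd number of quotes: no pairing is done
--             return []
--         it = iter(parts[1:])
--         return [q + inner + q for inner, _ in zip(it, it)]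
--     return paired('"'), paired("'")
-- ===== Notes on version B (the rewrite author's own statement) =====
-- stated objective: idiomatic
-- what changed: Replaces A's manual index-chasing find/slice while-loop with one str.split per quote character and pairwise consumption of the resulting parts (zip over one iterator), keeping A's parity guard.
import Mathlib
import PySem

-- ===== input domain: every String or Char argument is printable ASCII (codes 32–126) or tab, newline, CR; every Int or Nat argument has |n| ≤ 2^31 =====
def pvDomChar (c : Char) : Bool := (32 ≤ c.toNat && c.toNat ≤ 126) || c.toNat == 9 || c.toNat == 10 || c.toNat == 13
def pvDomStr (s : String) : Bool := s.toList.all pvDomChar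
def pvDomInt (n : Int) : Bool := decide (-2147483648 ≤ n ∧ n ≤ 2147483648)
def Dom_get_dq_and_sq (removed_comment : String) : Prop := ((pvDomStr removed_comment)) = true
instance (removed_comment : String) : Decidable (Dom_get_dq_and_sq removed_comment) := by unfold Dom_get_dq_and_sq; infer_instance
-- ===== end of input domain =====

-- B replaces A's manual find/slice index-chasing while-loop with one split per quote
-- character and pairwise consumption of the parts (idiomatic; return value only, no mutation).

-- ===== PORT A =====
-- A's while-loop: n = remaining iterations (count/2 - i), state: `end` index e and the list built so far
def pvALoop (s : String) (q : String) : Nat → Int → List String → List String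
  | 0, _, acc => acc
  | n+1, e, acc =>
      let start := PySem.Str.findFrom s q e
      let e2 := PySem.Str.findFrom s q (start + 1)
      pvALoop s q n (e2 + 1) (acc ++ [PySem.Str.slice s (some start) (some (e2 + 1))])

def get_dq_and_sq (removed_comment : String) : List String × List String :=
  let dq_count := PySem.Str.count removed_comment "\""
  let dq_lists := if dq_count % 2 == 1 then [] else pvALoop removed_comment "\"" (dq_count / 2) 0 []
  let sq_count := PySem.Str.count removed_comment "'"
  let sq_lists := if sq_count % 2 == 1 then [] else pvALoop removed_comment "'" (sq_count / 2) 0 []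
  (dq_lists, sq_lists)

-- ===== PORT B =====
-- zip(it, it) over parts[1:]: consume the parts two at a time, emitting q + inner + q
def pvBPairs (q : Char) : List (List Char) → List String
  | inner :: _ :: rest => String.ofList (q :: (inner ++ [q])) :: pvBPairs q rest
  | _ => []

-- removed_comment.split(q) for the 1-char separator q, then the parity guard and the pairing
def pvPaired (removed_comment : String) (q : Char) : List String :=
  let parts := PySem.Chars.splitOn removed_comment.toList [q]
  if parts.length % 2 == 0 then [] else pvBPairs q parts.tail

def get_dq_and_sq_alt (removed_comment : String) : List String × List String :=
  (pvPaired removed_comment '"', pvPaired removed_comment '\'')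

-- ===== PRECONDITION & SPEC =====
def Spec_get_dq_and_sq (removed_comment : String) (out : List String × List String) : Prop := out = get_dq_and_sq_alt removed_comment
instance (removed_comment : String) (out : List String × List String) : Decidable (Spec_get_dq_and_sq removed_comment out) := by unfold Spec_get_dq_and_sq; infer_instance

-- ===== CLAIM (what is proved, stated in full; the proofs are below) =====
def Claim_equal_get_dq_and_sq : Prop := ∀ (removed_comment : String), Dom_get_dq_and_sq removed_comment → Spec_get_dq_and_sq removed_comment (get_dq_and_sq removed_comment)

-- ===== LEMMAS AND PROOFS =====

def pvSplitSpec (q : Char) (cur : List Char) : List Char → List (List Char)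
  | [] => [cur]
  | c :: rest => if c = q then cur :: pvSplitSpec q [] rest else pvSplitSpec q (cur ++ [c]) rest
theorem pvSplitOnGo_succ_nil (sep f cur acc) :
    PySem.Chars.splitOn.go sep (f+1) [] cur acc = (cur.reverse :: acc).reverse := rfl
theorem pvSplitOnGo_succ_cons (sep f c rest cur acc) :
    PySem.Chars.splitOn.go sep (f+1) (c :: rest) cur acc =
      if sep.isPrefixOf (c :: rest) = true then
        PySem.Chars.splitOn.go sep f (List.drop sep.length (c :: rest)) [] (cur.reverse :: acc)
      else PySem.Chars.splitOn.go sep f rest (c :: cur) acc := rfl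
theorem pvSplitOn_go_spec (q : Char) :
    ∀ (l : List Char) (fuel : Nat) (cur : List Char) (acc : List (List Char)),
      l.length < fuel →
      PySem.Chars.splitOn.go [q] fuel l cur acc = acc.reverse ++ pvSplitSpec q cur.reverse l := by
  intro l
  induction l with
  | nil =>
    intro fuel cur acc h
    match fuel, h with
    | f+1, _ => simp [pvSplitOnGo_succ_nil, pvSplitSpec]
  | cons c rest ih =>
    intro fuel cur acc h
    match fuel, h with
    | f+1, h =>
      rw [pvSplitOnGo_succ_cons]
      by_cases hc : c = q
      · subst hc
        have hf : rest.length < f := by simp at h; omega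
        simp only [List.isPrefixOf, BEq.rfl, Bool.true_and, if_true, List.length_cons, List.length_nil, List.drop_succ_cons, List.drop_zero]
        rw [ih _ _ _ hf]
        simp [pvSplitSpec]
      · have : List.isPrefixOf [q] (c :: rest) = false := by
          simp [List.isPrefixOf]; exact fun h' => absurd h'.symm hc
        have hf : rest.length < f := by simp at h; omega
        rw [this]
        simp only [Bool.false_eq_true, if_false]
        rw [ih _ _ _ hf]
        simp [pvSplitSpec, hc]
theorem pvSplitOn_eq (q : Char) (l : List Char) :
    PySem.Chars.splitOn l [q] = pvSplitSpec q [] l := by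
  have := pvSplitOn_go_spec q l (l.length + 1) [] [] (by omega)
  simpa [PySem.Chars.splitOn] using this
theorem pvSplitSpec_length (q : Char) : ∀ (l cur : List Char),
    (pvSplitSpec q cur l).length = l.count q + 1 := by
  intro l
  induction l with
  | nil => intro cur; simp [pvSplitSpec]
  | cons c rest ih =>
    intro cur
    by_cases hc : c = q
    · subst hc; simp [pvSplitSpec, ih]
    · simp [pvSplitSpec, hc, ih, Ne.symm hc]

theorem pvSplitSpec_ne_nil (q : Char) (l cur : List Char) : pvSplitSpec q cur l ≠ [] := by
  intro h
  have := pvSplitSpec_length q l cur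
  rw [h] at this
  simp at this

theorem pvSplitSpec_no_q (q : Char) : ∀ (l cur : List Char), q ∉ l →
    pvSplitSpec q cur l = [cur ++ l] := by
  intro l
  induction l with
  | nil => intro cur _; simp [pvSplitSpec]
  | cons c rest ih =>
    intro cur h
    have hc : ¬ c = q := fun hcq => h (hcq ▸ List.mem_cons_self)
    have hr : q ∉ rest := fun hm => h (List.mem_cons_of_mem _ hm)
    simp [pvSplitSpec, hc, ih _ hr]

theorem pvSplitSpec_mem (q : Char) : ∀ (l cur : List Char), q ∈ l →
    pvSplitSpec q cur l =
      (cur ++ l.takeWhile (· ≠ q)) :: pvSplitSpec q [] ((l.dropWhile (· ≠ q)).tail) := by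
  intro l
  induction l with
  | nil => intro cur h; simp at h
  | cons c rest ih =>
    intro cur h
    by_cases hc : c = q
    · subst hc
      simp [pvSplitSpec, List.takeWhile, List.dropWhile]
    · have hr : q ∈ rest := by
        rcases List.mem_cons.mp h with h1 | h2
        · exact absurd h1.symm hc
        · exact h2
      have htw : (c :: rest).takeWhile (· ≠ q) = c :: rest.takeWhile (· ≠ q) := by
        simp [List.takeWhile, hc]
      have hdw : (c :: rest).dropWhile (· ≠ q) = rest.dropWhile (· ≠ q) := by
        simp [List.dropWhile, hc]
      rw [htw, hdw]
      simp only [pvSplitSpec, if_neg hc]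
      rw [ih _ hr]
      simp

theorem pvDropWhile_mem (q : Char) : ∀ (l : List Char), q ∈ l →
    l.dropWhile (· ≠ q) = q :: (l.dropWhile (· ≠ q)).tail := by
  intro l
  induction l with
  | nil => intro h; simp at h
  | cons c rest ih =>
    intro h
    by_cases hc : c = q
    · subst hc; simp [List.dropWhile]
    · have hr : q ∈ rest := by
        rcases List.mem_cons.mp h with h1 | h2
        · exact absurd h1.symm hc
        · exact h2
      simp only [List.dropWhile, hc, ne_eq, not_false_eq_true, decide_true]
      exact ih hr

theorem pvDrop_takeWhile (q : Char) : ∀ (l : List Char),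
    l.drop (l.takeWhile (· ≠ q)).length = l.dropWhile (· ≠ q) := by
  intro l
  induction l with
  | nil => simp
  | cons c rest ih =>
    by_cases hc : c = q
    · subst hc; simp [List.takeWhile, List.dropWhile]
    · simp only [List.takeWhile, List.dropWhile, hc, ne_eq, not_false_eq_true, decide_true,
        List.length_cons, List.drop_succ_cons]
      simpa using ih
theorem pvCountGo_zero (sub l acc) : PySem.Chars.count.go sub 0 l acc = acc := rfl
theorem pvCountGo_succ_nil (sub f acc) : PySem.Chars.count.go sub (f+1) [] acc = acc := rfl
theorem pvCountGo_succ_cons (sub f c t acc) :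
    PySem.Chars.count.go sub (f+1) (c :: t) acc =
      if sub.isPrefixOf (c :: t) = true then
        PySem.Chars.count.go sub f (List.drop sub.length (c :: t)) (acc + 1)
      else PySem.Chars.count.go sub f t acc := rfl

theorem pvCountGo_single (q : Char) : ∀ (l : List Char) (fuel : Nat) (acc : Nat),
    l.length ≤ fuel → PySem.Chars.count.go [q] fuel l acc = acc + l.count q := by
  intro l
  induction l with
  | nil =>
    intro fuel acc _
    cases fuel with
    | zero => simp [pvCountGo_zero]
    | succ f => simp [pvCountGo_succ_nil]
  | cons c t ih =>
    intro fuel acc h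
    match fuel, h with
    | f+1, h =>
      have hf : t.length ≤ f := by simp at h; omega
      rw [pvCountGo_succ_cons]
      by_cases hc : q = c
      · subst hc
        simp only [List.isPrefixOf, BEq.rfl, Bool.true_and, List.isPrefixOf_nil_left, if_true,
          List.length_cons, List.length_nil, List.drop_succ_cons, List.drop_zero]
        rw [ih _ _ hf]
        simp [List.count_cons]
        omega
      · have hp : List.isPrefixOf [q] (c :: t) = false := by
          simp [List.isPrefixOf]; exact hc
        rw [hp]
        simp only [Bool.false_eq_true, if_false]
        rw [ih _ _ hf]
        simp [List.count_cons, Ne.symm hc, hc]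

theorem pvCount_single (q : Char) (l : List Char) :
    PySem.Chars.count l [q] = l.count q := by
  simp only [PySem.Chars.count, List.isEmpty_cons, Bool.false_eq_true, if_false]
  simpa using pvCountGo_single q l l.length 0 le_rfl

theorem pvFindGo_single (q : Char) : ∀ (l : List Char) (x : Nat),
    PySem.Chars.find.go [q] l x =
      if q ∈ l then (((x + (l.takeWhile (· ≠ q)).length : Nat) : Int)) else -1 := by
  intro l
  induction l with
  | nil => intro x; simp [PySem.Chars.find.go.eq_1]
  | cons c t ih =>
    intro x
    rw [PySem.Chars.find.go.eq_2]
    by_cases hc : q = c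
    · subst hc
      simp [List.isPrefixOf, List.takeWhile]
    · have hp : List.isPrefixOf [q] (c :: t) = false := by
        simp [List.isPrefixOf]; exact hc
      rw [hp]
      simp only [Bool.false_eq_true, if_false]
      rw [ih (x+1)]
      have hm : (q ∈ c :: t) = (q ∈ t) := by
        simp [List.mem_cons, hc]
      have htw : (c :: t).takeWhile (· ≠ q) = c :: t.takeWhile (· ≠ q) := by
        simp [List.takeWhile, Ne.symm hc]
      rw [htw]
      by_cases hq : q ∈ t
      · simp only [hq, if_true, hm ▸ (by simp [hq, List.mem_cons, hc] : q ∈ c :: t ↔ q ∈ t)]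
        simp [List.mem_cons, hc, hq]
        push_cast
        ring
      · simp [List.mem_cons, hc, hq]

theorem pvFind_single (q : Char) (l : List Char) :
    PySem.Chars.find l [q] =
      if q ∈ l then (((l.takeWhile (· ≠ q)).length : Nat) : Int) else -1 := by
  simpa using pvFindGo_single q l 0

theorem pvMain (s : String) (qs : String) (q : Char) (hqs : qs.toList = [q]) :
    ∀ (n : Nat) (k : Nat) (acc : List String),
      k ≤ s.toList.length →
      (s.toList.drop k).count q = 2 * n →
      pvALoop s qs n (k : Int) acc =
        acc ++ pvBPairs q (pvSplitSpec q [] (s.toList.drop k)).tail := by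
  intro n
  induction n with
  | zero =>
    intro k acc _ hc
    have hq : q ∉ s.toList.drop k := by
      rw [← List.count_eq_zero]; simpa using hc
    rw [pvSplitSpec_no_q q _ [] hq]
    simp [pvALoop, pvBPairs]
  | succ n ih =>
    intro k acc hk hc
    -- names for the pieces of l := s.toList.drop k
    set L := s.toList with hL
    have hql : q ∈ L.drop k := by
      have : 0 < (L.drop k).count q := by omega
      exact List.count_pos_iff.mp this
    set tw1 := (L.drop k).takeWhile (· ≠ q) with htw1
    set l2 := ((L.drop k).dropWhile (· ≠ q)).tail with hl2
    have hdw1 : (L.drop k).dropWhile (· ≠ q) = q :: l2 := pvDropWhile_mem q _ hql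
    have hdrop1 : (L.drop k).drop tw1.length = q :: l2 := by
      rw [htw1, pvDrop_takeWhile q]; exact hdw1
    have hsplit1 : L.drop k = tw1 ++ q :: l2 := by
      rw [htw1, ← hdw1]; exact (List.takeWhile_append_dropWhile).symm
    have htw1_count : tw1.count q = 0 := by
      rw [List.count_eq_zero]
      intro hmem
      have := List.mem_takeWhile_imp hmem
      simp at this
    have hcl2 : l2.count q = 2 * n + 1 := by
      have := hc
      rw [hsplit1] at this
      simp [List.count_append, htw1_count] at this
      omega
    have hql2 : q ∈ l2 := List.count_pos_iff.mp (by omega)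
    set tw2 := l2.takeWhile (· ≠ q) with htw2
    set l3 := (l2.dropWhile (· ≠ q)).tail with hl3
    have hdw2 : l2.dropWhile (· ≠ q) = q :: l3 := pvDropWhile_mem q _ hql2
    have hsplit2 : l2 = tw2 ++ q :: l3 := by
      rw [htw2, ← hdw2]; exact (List.takeWhile_append_dropWhile).symm
    have htw2_count : tw2.count q = 0 := by
      rw [List.count_eq_zero]
      intro hmem
      have := List.mem_takeWhile_imp hmem
      simp at this
    have hcl3 : l3.count q = 2 * n := by
      have := hcl2
      rw [hsplit2] at this
      simp [List.count_append, htw2_count] at this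
      omega
    -- index arithmetic
    have hlen1 : k + tw1.length + 1 + l2.length = L.length := by
      have h1 : (L.drop k).length = L.length - k := by simp
      have : (L.drop k).length = tw1.length + 1 + l2.length := by
        rw [hsplit1]; simp; omega
      omega
    have hlen2 : tw2.length + 1 + l3.length = l2.length := by
      have : l2.length = tw2.length + 1 + l3.length := by rw [hsplit2]; simp; omega
      omega
    have hk1 : k + tw1.length + 1 ≤ L.length := by omega
    have hk2 : k + tw1.length + 1 + tw2.length + 1 ≤ L.length := by omega
    -- drops at the absolute indices
    have hdropk1 : L.drop (k + tw1.length) = q :: l2 := by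
      rw [← hdrop1, List.drop_drop]
    have hdropk2 : L.drop (k + tw1.length + 1) = l2 := by
      have : L.drop (k + tw1.length + 1) = (L.drop (k + tw1.length)).drop 1 := by
        rw [List.drop_drop]
      rw [this, hdropk1]; simp
    have hdropk3 : L.drop (k + tw1.length + 1 + tw2.length + 1) = l3 := by
      have h1 : L.drop (k + tw1.length + 1 + tw2.length) = q :: l3 := by
        have : L.drop (k + tw1.length + 1 + tw2.length) = (L.drop (k + tw1.length + 1)).drop tw2.length := by
          rw [List.drop_drop]
        rw [this, hdropk2, htw2, pvDrop_takeWhile q]; exact hdw2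
      have : L.drop (k + tw1.length + 1 + tw2.length + 1) = (L.drop (k + tw1.length + 1 + tw2.length)).drop 1 := by
        rw [List.drop_drop]
      rw [this, h1]; simp
    -- the two finds
    have hfind1 : PySem.Chars.findFrom L [q] (k : Int) none = ((k + tw1.length : Nat) : Int) := by
      rw [PySem.Chars.findFrom_natCast L [q] k hk]
      rw [pvFind_single, if_pos hql]
      rw [← htw1]
      have : ¬ ((tw1.length : Int) = -1) := by omega
      simp only [if_neg this]
      push_cast; ring
    have hcast1 : ((k + tw1.length : Nat) : Int) + 1 = ((k + tw1.length + 1 : Nat) : Int) := by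
      push_cast; ring
    have hfind2 : PySem.Chars.findFrom L [q] ((k + tw1.length + 1 : Nat) : Int) none
        = ((k + tw1.length + 1 + tw2.length : Nat) : Int) := by
      rw [PySem.Chars.findFrom_natCast L [q] (k + tw1.length + 1) hk1]
      rw [pvFind_single, hdropk2, if_pos hql2, ← htw2]
      have : ¬ ((tw2.length : Int) = -1) := by omega
      simp only [if_neg this]
      push_cast; ring
    have htake : l2.take (tw2.length + 1) = tw2 ++ [q] := by
      rw [hsplit2, List.take_append]
      have h1 : tw2.take (tw2.length + 1) = tw2 := List.take_of_length_le (by omega)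
      have h2 : tw2.length + 1 - tw2.length = 1 := by omega
      rw [h1, h2]
      simp
    have hcast2 : ((k + tw1.length + 1 + tw2.length : Nat) : Int) + 1
        = ((k + tw1.length + 1 + tw2.length + 1 : Nat) : Int) := by push_cast; ring
    have hslice : PySem.Str.slice s (some ((k + tw1.length : Nat) : Int))
        (some (((k + tw1.length + 1 + tw2.length : Nat) : Int) + 1))
        = String.ofList (q :: (tw2 ++ [q])) := by
      rw [hcast2]
      simp only [PySem.Str.slice, PySem.Chars.slice_eq_listSlice, ← hL]
      rw [PySem.List.slice_natCast]
      have hsub : k + tw1.length + 1 + tw2.length + 1 - (k + tw1.length) = tw2.length + 2 := by omega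
      rw [hsub, hdropk1]
      rw [List.take_succ_cons, htake]
    -- unfold one step of the loop
    show pvALoop s qs (n+1) (k : Int) acc = _
    rw [pvALoop]
    simp only [PySem.Str.findFrom_eq, hqs, ← hL]
    rw [hfind1, hcast1, hfind2, hslice, hcast2]
    rw [ih (k + tw1.length + 1 + tw2.length + 1) (acc ++ [String.ofList (q :: (tw2 ++ [q]))]) hk2 (by rw [hdropk3]; exact hcl3)]
    rw [hdropk3]
    -- right-hand side structure
    rw [pvSplitSpec_mem q _ [] hql]
    rw [pvSplitSpec_mem q l2 [] hql2]
    obtain ⟨p2, rest, hrest⟩ : ∃ p2 rest, pvSplitSpec q [] l3 = p2 :: rest := by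
      cases hsp : pvSplitSpec q [] l3 with
      | nil => exact absurd hsp (pvSplitSpec_ne_nil q l3 [])
      | cons a b => exact ⟨a, b, rfl⟩
    rw [hrest]
    have hpred : List.takeWhile (fun x => !decide (x = q)) l2 = tw2 := by
      rw [htw2]; simp [ne_eq]
    simp [pvBPairs, hpred]

theorem pvSide (s : String) (qs : String) (q : Char) (hqs : qs.toList = [q]) :
    (let c := PySem.Str.count s qs
     if c % 2 == 1 then [] else pvALoop s qs (c / 2) 0 []) = pvPaired s q := by
  have hcnt : PySem.Str.count s qs = s.toList.count q := by
    simp only [PySem.Str.count, hqs]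
    exact pvCount_single q s.toList
  show (if PySem.Str.count s qs % 2 == 1 then [] else pvALoop s qs (PySem.Str.count s qs / 2) 0 []) = pvPaired s q
  rw [hcnt]
  unfold pvPaired
  rw [pvSplitOn_eq]
  have hlen : (pvSplitSpec q [] s.toList).length = s.toList.count q + 1 :=
    pvSplitSpec_length q _ []
  by_cases hodd : s.toList.count q % 2 = 1
  · rw [if_pos (by simp [hodd]), if_pos (by simp [hlen]; omega)]
  · rw [if_neg (by simp; omega), if_neg (by simp [hlen]; omega)]
    have h2 : s.toList.count q = 2 * (s.toList.count q / 2) := by omega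
    have := pvMain s qs q hqs (s.toList.count q / 2) 0 [] (by omega) (by simpa using h2)
    simpa using this

-- ===== VERDICT (by name: the statement is the Claim_ definition above) =====
theorem get_dq_and_sq_spec : Claim_equal_get_dq_and_sq := by
  intro s _
  unfold Spec_get_dq_and_sq get_dq_and_sq get_dq_and_sq_alt
  refine Prod.ext ?_ ?_
  · exact pvSide s "\"" '"' (by decide)
  · exact pvSide s "'" '\'' (by decide)
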